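-- pv_equiv track=rewrite | github.com/yifan1207/PT-IT-Model-Differences | src/poc/exp7/tuned_lens_probes.py | _commitment_from_top1
-- ===== SOURCE A (Python) =====
-- def _commitment_from_top1(top1_by_layer: list[int]) -> int:
--     """Find earliest layer where top-1 matches final and stays matched (no-flip-back)."""
--     n = len(top1_by_layer)
--     final_top1 = top1_by_layer[-1]
--     for i in range(n):
--         if top1_by_layer[i] == final_top1 and all(
--             top1_by_layer[j] == final_top1 for j in range(i, n)
--         ):
--             return i
--     return n - 1
-- ===== SOURCE B (Python) =====
-- def _commitment_from_top1(top1_by_layer: list[int]) -> int: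
--     """Backward scan: the answer is the index just after the last mismatch with the final top-1."""
--     final = top1_by_layer[-1]
--     k = len(top1_by_layer) - 1
--     while k > 0 and top1_by_layer[k - 1] == final:
--         k -= 1
--     return k
-- ===== Notes on version B (the rewrite author's own statement) =====
-- stated objective: alternative
-- what changed: Replaced the forward scan that rechecks the whole suffix with all() at each candidate by a single backward while-loop that stops at the last index disagreeing with the final element.
-- outside the precondition, e.g. on _commitment_from_top1([]): A raises IndexError, B raises IndexError
import Mathlib
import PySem

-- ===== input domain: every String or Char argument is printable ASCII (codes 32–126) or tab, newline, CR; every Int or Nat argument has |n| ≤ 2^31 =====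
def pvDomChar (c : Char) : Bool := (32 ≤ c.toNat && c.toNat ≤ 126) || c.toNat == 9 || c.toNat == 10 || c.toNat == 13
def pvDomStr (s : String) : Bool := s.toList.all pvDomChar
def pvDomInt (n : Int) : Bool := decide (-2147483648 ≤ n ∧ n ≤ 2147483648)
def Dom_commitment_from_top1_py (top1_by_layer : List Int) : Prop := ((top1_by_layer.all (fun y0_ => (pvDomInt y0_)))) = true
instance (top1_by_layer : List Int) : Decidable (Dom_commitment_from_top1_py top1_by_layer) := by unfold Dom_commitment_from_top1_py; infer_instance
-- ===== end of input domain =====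

-- B replaces A's forward scan (with an inner all() recheck over each suffix)
-- by a single backward while-loop stopping at the last mismatch with the final element.

-- ===== PORT A =====
-- inner 'all(top1_by_layer[j] == final_top1 for j in range(i, n))'
def pvAllEq (xs : List Int) (f : Int) (js : List Int) : Bool :=
  js.all (fun j => PySem.List.pyGetD xs j 0 == f)

-- 'for i in range(n): if …: return i' / fall through to 'return n - 1'
def pvGoA (xs : List Int) (f : Int) (n : Int) : List Int → Int
  | [] => n - 1
  | i :: rest =>
      if (PySem.List.pyGetD xs i 0 == f) && pvAllEq xs f (PySem.List.pyRange i n 1) then i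
      else pvGoA xs f n rest

def commitment_from_top1_py (top1_by_layer : List Int) : Int :=
  let n : Int := top1_by_layer.length
  let final_top1 := PySem.List.pyGetD top1_by_layer (-1) 0
  pvGoA top1_by_layer final_top1 n (PySem.List.pyRange 0 n 1)

-- ===== PORT B =====
-- 'while k > 0 and top1_by_layer[k - 1] == final: k -= 1' — structural recursion on k
def pvGoB (xs : List Int) (f : Int) : Nat → Int
  | 0 => 0
  | k + 1 => if PySem.List.pyGetD xs (k : Int) 0 == f then pvGoB xs f k else ((k : Int) + 1)

def commitment_from_top1_py_alt (top1_by_layer : List Int) : Int :=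
  let final := PySem.List.pyGetD top1_by_layer (-1) 0
  pvGoB top1_by_layer final (top1_by_layer.length - 1)

-- ===== PRECONDITION & SPEC =====
-- Pre_ excludes only the empty list, on which A raises IndexError (top1_by_layer[-1]).
def Pre_commitment_from_top1_py (top1_by_layer : List Int) : Prop := top1_by_layer ≠ []
instance (top1_by_layer : List Int) : Decidable (Pre_commitment_from_top1_py top1_by_layer) := by
  unfold Pre_commitment_from_top1_py; infer_instance
def pvWitness_commitment_from_top1_py : List Int := [1, 2, 2]

def Spec_commitment_from_top1_py (top1_by_layer : List Int) (out : Int) : Prop := out = commitment_from_top1_py_alt top1_by_layer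
instance (top1_by_layer : List Int) (out : Int) : Decidable (Spec_commitment_from_top1_py top1_by_layer out) := by unfold Spec_commitment_from_top1_py; infer_instance

-- ===== CLAIM (what is proved, stated in full; the proofs are below) =====
def Claim_equal_commitment_from_top1_py : Prop := ∀ (top1_by_layer : List Int), Dom_commitment_from_top1_py top1_by_layer → Pre_commitment_from_top1_py top1_by_layer → Spec_commitment_from_top1_py top1_by_layer (commitment_from_top1_py top1_by_layer)

-- ===== LEMMAS AND PROOFS =====

-- E xs f j : element j (as a Nat index, with getD default 0) equals f
def pvE (xs : List Int) (f : Int) (j : Nat) : Prop := xs.getD j 0 = f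

theorem pvE_last (xs : List Int) (h : xs ≠ []) :
    pvE xs (PySem.List.pyGetD xs (-1) 0) (xs.length - 1) := by
  unfold pvE
  rw [PySem.List.pyGetD_neg_one xs 0 h]
  have hl : xs.length - 1 < xs.length := by
    have := List.length_pos_of_ne_nil h; omega
  rw [List.getD_eq_getElem xs 0 hl, List.getLast_eq_getElem]

theorem pvGoB_spec (xs : List Int) (f : Int) (k : Nat) :
    ∃ i : Nat, pvGoB xs f k = (i : Int) ∧ i ≤ k ∧
      (∀ j : Nat, i ≤ j → j < k → pvE xs f j) ∧ (i = 0 ∨ ¬ pvE xs f (i - 1)) := by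
  induction k with
  | zero => exact ⟨0, rfl, le_refl 0, by omega, Or.inl rfl⟩
  | succ k ih =>
    by_cases hc : xs.getD k 0 = f
    · obtain ⟨i, hi, hle, hall, hmin⟩ := ih
      refine ⟨i, ?_, by omega, ?_, hmin⟩
      · simp only [pvGoB, PySem.List.pyGetD_natCast, beq_iff_eq, hc, if_true, hi]
      · intro j h1 h2
        rcases Nat.lt_or_ge j k with h | h
        · exact hall j h1 h
        · have hjk : j = k := by omega
          rw [hjk]; exact hc
    · refine ⟨k + 1, ?_, le_refl _, by omega, Or.inr (by simpa [pvE] using hc)⟩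
      simp only [pvGoB, PySem.List.pyGetD_natCast, beq_iff_eq, hc, if_false]
      push_cast; ring

theorem pvAllEq_iff (xs : List Int) (f : Int) (a : Nat) :
    pvAllEq xs f (PySem.List.pyRange (a : Int) (xs.length : Int) 1) = true ↔
      (∀ j : Nat, a ≤ j → j < xs.length → pvE xs f j) := by
  unfold pvAllEq
  rw [List.all_eq_true]
  constructor
  · intro h j h1 h2
    have hm : (j : Int) ∈ PySem.List.pyRange (a : Int) (xs.length : Int) 1 := by
      rw [PySem.List.mem_pyRange_one]; omega
    have := h _ hm
    unfold pvE
    simpa using this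
  · intro h j hm
    rw [PySem.List.mem_pyRange_one] at hm
    have h0 : 0 ≤ j := by omega
    have hj : j = ((j.toNat : Nat) : Int) := by omega
    rw [hj, PySem.List.pyGetD_natCast]
    have := h j.toNat (by omega) (by omega)
    simpa [pvE] using this

theorem pvGoA_spec (xs : List Int) (h : xs ≠ []) (a : Nat) (ha : a < xs.length) :
    ∃ i : Nat, pvGoA xs (PySem.List.pyGetD xs (-1) 0) (xs.length : Int)
        (PySem.List.pyRange (a : Int) (xs.length : Int) 1) = (i : Int) ∧
      a ≤ i ∧ i < xs.length ∧
      (∀ j : Nat, i ≤ j → j < xs.length → pvE xs (PySem.List.pyGetD xs (-1) 0) j) ∧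
      (∀ j : Nat, a ≤ j → j < i → ¬ ∀ j' : Nat, j ≤ j' → j' < xs.length → pvE xs (PySem.List.pyGetD xs (-1) 0) j') := by
  set f := PySem.List.pyGetD xs (-1) 0 with hf
  have hd : ∀ m : Nat, ∀ a : Nat, a < xs.length → xs.length - a ≤ m →
      ∃ i : Nat, pvGoA xs f (xs.length : Int)
          (PySem.List.pyRange (a : Int) (xs.length : Int) 1) = (i : Int) ∧
        a ≤ i ∧ i < xs.length ∧
        (∀ j : Nat, i ≤ j → j < xs.length → pvE xs f j) ∧
        (∀ j : Nat, a ≤ j → j < i → ¬ ∀ j' : Nat, j ≤ j' → j' < xs.length → pvE xs f j') := by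
    intro m
    induction m with
    | zero => intro a ha hm; omega
    | succ m ih =>
      intro a ha hm
      have hcons : PySem.List.pyRange (a : Int) (xs.length : Int) 1 =
          (a : Int) :: PySem.List.pyRange ((a : Int) + 1) (xs.length : Int) 1 :=
        PySem.List.pyRange_one_cons (by omega)
      by_cases hca : ∀ j : Nat, a ≤ j → j < xs.length → pvE xs f j
      · -- condition at a holds: both conjuncts are true, return a
        have h1 : (PySem.List.pyGetD xs (a : Int) 0 == f) = true := by
          rw [beq_iff_eq, PySem.List.pyGetD_natCast]
          exact hca a (le_refl a) ha
        have h2 : pvAllEq xs f (PySem.List.pyRange (a : Int) (xs.length : Int) 1) = true :=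
          (pvAllEq_iff xs f a).mpr hca
        refine ⟨a, ?_, le_refl a, ha, hca, by omega⟩
        rw [hcons]
        simp only [pvGoA]
        rw [h1, h2]
        simp
      · -- condition at a fails: the inner all() is false (it implies the whole hypothesis)
        have hAE : pvAllEq xs f (PySem.List.pyRange (a : Int) (xs.length : Int) 1) = false := by
          cases hae : pvAllEq xs f (PySem.List.pyRange (a : Int) (xs.length : Int) 1) with
          | true => exact absurd ((pvAllEq_iff xs f a).mp hae) hca
          | false => rfl
        have hane : a ≠ xs.length - 1 := by
          intro he
          apply hca
          intro j h1 h2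
          have hj : j = xs.length - 1 := by omega
          rw [hj]
          exact pvE_last xs h
        obtain ⟨i, hi, hle, hlt, hall, hmin⟩ := ih (a + 1) (by omega) (by omega)
        refine ⟨i, ?_, by omega, hlt, hall, ?_⟩
        · rw [hcons]
          simp only [pvGoA]
          rw [hAE]
          simp only [Bool.and_false, Bool.false_eq_true, if_false]
          have hcast : ((a : Int) + 1) = ((a + 1 : Nat) : Int) := by push_cast; ring
          rw [hcast, hi]
        · intro j h1 h2
          rcases Nat.eq_or_lt_of_le h1 with he | hlt2
          · rw [← he]; exact hca
          · exact hmin j (by omega) h2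
  obtain ⟨i, hi⟩ := hd (xs.length - a) a ha (le_refl _)
  exact ⟨i, hi⟩

theorem commitment_from_top1_py_spec : Claim_equal_commitment_from_top1_py := by
  intro xs _ hpre
  unfold Spec_commitment_from_top1_py
  unfold commitment_from_top1_py commitment_from_top1_py_alt
  set f := PySem.List.pyGetD xs (-1) 0 with hf
  have hn : 0 < xs.length := List.length_pos_of_ne_nil hpre
  obtain ⟨i1, h1eq, h1a, h1lt, h1all, h1min⟩ := pvGoA_spec xs hpre 0 hn
  obtain ⟨i2, h2eq, h2le, h2all, h2min⟩ := pvGoB_spec xs f (xs.length - 1)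
  have hlast : pvE xs f (xs.length - 1) := pvE_last xs hpre
  -- B's result also satisfies "all of [i2, n) equal f"
  have h2P : ∀ j : Nat, i2 ≤ j → j < xs.length → pvE xs f j := by
    intro j hj1 hj2
    rcases Nat.lt_or_ge j (xs.length - 1) with hlt | hge
    · exact h2all j hj1 hlt
    · have : j = xs.length - 1 := by omega
      rw [this]; exact hlast
  have heq : i1 = i2 := by
    rcases Nat.lt_trichotomy i1 i2 with hlt | he | hgt
    · -- i1 < i2: i2 > 0 and xs[i2-1] ≠ f, but P i1 gives xs[i2-1] = f
      rcases h2min with h0 | hne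
      · omega
      · exact absurd (h1all (i2 - 1) (by omega) (by omega)) hne
    · exact he
    · -- i2 < i1: minimality of A at j = i2 contradicts h2P
      exact absurd h2P (h1min i2 (by omega) hgt)
  rw [show ((0:Int)) = ((0:Nat):Int) from rfl] at *
  simpa [h2eq, heq] using h1eq
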